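-- pv_equiv track=rewrite | github.com/Bylins-Team/mud | tools/convert_to_yaml.py | parse_ascii_flags
-- ===== SOURCE A (Python) =====
-- def parse_ascii_flags(flags_str, flag_names, planes=4):
--     """Parse ASCII flags like 'd0o0p0' into list of flag names."""
--     result = []
--     if not flags_str or flags_str == "0":
--         return result
--
--     i = 0
--     while i < len(flags_str):
--         if flags_str[i].isalpha():
--             letter = flags_str[i].lower()
--             plane = 0
--             # Check for plane digit
--             if i + 1 < len(flags_str) and flags_str[i + 1].isdigit():
--                 plane = int(flags_str[i + 1])
--                 i += 2
--             else:
--                 i += 1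
--
--             # Convert letter to index (a=0, b=1, etc)
--             bit_pos = ord(letter) - ord('a')
--             if bit_pos >= 0 and bit_pos < 30:
--                 flag_index = plane * 30 + bit_pos
--                 if flag_index < len(flag_names):
--                     result.append(flag_names[flag_index])
--         else:
--             i += 1
--
--     return result
-- ===== SOURCE B (Python) =====
-- def parse_ascii_flags(flags_str, flag_names, planes=4):
--     """Parse ASCII flags like 'd0o0p0' into list of flag names.
--
--     Two-pass rewrite: a single-state tokenizer turns the string into
--     (letter, plane) tokens, then a separate pass interprets the tokens.
--     """
--     tokens = []
--     pending = None  # letter seen, waiting for an optional plane digit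
--     for ch in flags_str:
--         if ch.isalpha():
--             if pending is not None:
--                 tokens.append((pending, 0))
--             pending = ch
--         elif pending is not None:
--             if ch.isdigit():
--                 tokens.append((pending, int(ch)))
--             else:
--                 tokens.append((pending, 0))
--             pending = None
--     if pending is not None:
--         tokens.append((pending, 0))
--
--     out = []
--     for letter, plane in tokens:
--         bit_pos = ord(letter.lower()) - ord('a')
--         if 0 <= bit_pos < 30:
--             idx = plane * 30 + bit_pos
--             if idx < len(flag_names):
--                 out.append(flag_names[idx])
--     return out
-- ===== Notes on version B (the rewrite author's own statement) =====
-- stated objective: alternative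
-- what changed: Replaces A's index-based scan with lookahead by a two-pass design: a single-state tokenizer (direct iteration over characters, no indexing) producing (letter, plane) tokens, followed by a separate interpretation pass over the token list.
import Mathlib
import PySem

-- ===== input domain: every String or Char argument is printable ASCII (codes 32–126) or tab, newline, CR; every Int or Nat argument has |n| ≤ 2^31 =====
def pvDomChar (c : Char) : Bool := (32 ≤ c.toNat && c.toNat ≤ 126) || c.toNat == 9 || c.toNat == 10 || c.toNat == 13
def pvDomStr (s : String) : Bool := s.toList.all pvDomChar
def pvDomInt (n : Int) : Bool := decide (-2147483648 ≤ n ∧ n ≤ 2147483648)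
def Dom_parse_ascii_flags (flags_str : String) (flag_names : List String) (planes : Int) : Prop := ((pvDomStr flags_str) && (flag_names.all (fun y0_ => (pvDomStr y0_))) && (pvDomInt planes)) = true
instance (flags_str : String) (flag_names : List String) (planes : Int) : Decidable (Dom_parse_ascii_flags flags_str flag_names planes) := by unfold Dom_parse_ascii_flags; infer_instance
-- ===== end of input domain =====

-- ===== PORT A =====
-- One honest line: B tokenizes in one stateful pass then interprets the token list,
-- instead of A's index scan with digit lookahead; same cost, different decomposition.
-- A helper: append flag_names[plane*30+bit] when in range ('letter' is already lowered).
def pvAEmit (letter : Char) (plane : Int) (flag_names : List String) : List String :=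
  let bit_pos : Int := (letter.toNat : Int) - 97
  if 0 ≤ bit_pos ∧ bit_pos < 30 then
    let flag_index := plane * 30 + bit_pos
    if flag_index < (flag_names.length : Int) then
      [(PySem.List.pyGet? flag_names flag_index).getD ""]  -- index proven in range; getD never used
    else []
  else []

-- A's while loop: at a letter consume an optional following digit (int(ch) = ch.toNat-48, exact on ASCII digits)
def pvALoop (cs : List Char) (flag_names : List String) : List String :=
  match cs with
  | [] => []
  | [c] =>
    if PySem.Chars.isalpha c then pvAEmit (PySem.Chars.lowerChar c) 0 flag_names
    else []
  | c :: d :: rest =>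
    if PySem.Chars.isalpha c then
      if PySem.Chars.isdigit d then
        pvAEmit (PySem.Chars.lowerChar c) ((d.toNat : Int) - 48) flag_names ++ pvALoop rest flag_names
      else
        pvAEmit (PySem.Chars.lowerChar c) 0 flag_names ++ pvALoop (d :: rest) flag_names
    else pvALoop (d :: rest) flag_names

def parse_ascii_flags (flags_str : String) (flag_names : List String) (planes : Int) : List String :=
  if flags_str = "" ∨ flags_str = "0" then []
  else pvALoop flags_str.toList flag_names

-- ===== PORT B =====
-- B's tokenizer: one pass, carrying the pending letter awaiting an optional plane digit
def pvTokLoop (cs : List Char) (pending : Option Char) : List (Char × Int) :=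
  match cs with
  | [] => match pending with | some l => [(l, 0)] | none => []
  | c :: rest =>
    if PySem.Chars.isalpha c then
      (match pending with | some l => [(l, 0)] | none => []) ++ pvTokLoop rest (some c)
    else
      match pending with
      | some l =>
        if PySem.Chars.isdigit c then (l, (c.toNat : Int) - 48) :: pvTokLoop rest none
        else (l, 0) :: pvTokLoop rest none
      | none => pvTokLoop rest none

-- B's interpretation pass over the token list
def pvBStep (flag_names : List String) (out : List String) (tok : Char × Int) : List String :=
  let bit_pos : Int := ((PySem.Chars.lowerChar tok.1).toNat : Int) - 97
  if 0 ≤ bit_pos ∧ bit_pos < 30 then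
    let idx := tok.2 * 30 + bit_pos
    if idx < (flag_names.length : Int) then
      out ++ [(PySem.List.pyGet? flag_names idx).getD ""]
    else out
  else out

def parse_ascii_flags_alt (flags_str : String) (flag_names : List String) (planes : Int) : List String :=
  (pvTokLoop flags_str.toList none).foldl (pvBStep flag_names) []

-- ===== PRECONDITION & SPEC =====
def Spec_parse_ascii_flags (flags_str : String) (flag_names : List String) (planes : Int) (out : List String) : Prop := out = parse_ascii_flags_alt flags_str flag_names planes
instance (flags_str : String) (flag_names : List String) (planes : Int) (out : List String) : Decidable (Spec_parse_ascii_flags flags_str flag_names planes out) := by unfold Spec_parse_ascii_flags; infer_instance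

-- ===== CLAIM (what is proved, stated in full; the proofs are below) =====
def Claim_equal_parse_ascii_flags : Prop := ∀ (flags_str : String) (flag_names : List String) (planes : Int), Dom_parse_ascii_flags flags_str flag_names planes → Spec_parse_ascii_flags flags_str flag_names planes (parse_ascii_flags flags_str flag_names planes)

-- ===== LEMMAS AND PROOFS =====

-- the per-token emission as a function (what pvBStep appends)
def pvTokEmit (flag_names : List String) (tok : Char × Int) : List String :=
  let bit_pos : Int := ((PySem.Chars.lowerChar tok.1).toNat : Int) - 97
  if 0 ≤ bit_pos ∧ bit_pos < 30 then
    let idx := tok.2 * 30 + bit_pos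
    if idx < (flag_names.length : Int) then
      [(PySem.List.pyGet? flag_names idx).getD ""]
    else []
  else []

theorem pvBStep_eq (fn : List String) (out : List String) (tok : Char × Int) :
    pvBStep fn out tok = out ++ pvTokEmit fn tok := by
  simp only [pvBStep, pvTokEmit]
  split_ifs <;> simp

theorem pvInterp_eq_flatMap (toks : List (Char × Int)) (fn : List String) (acc : List String) :
    toks.foldl (pvBStep fn) acc = acc ++ toks.flatMap (pvTokEmit fn) := by
  induction toks generalizing acc with
  | nil => simp
  | cons t ts ih => simp [List.foldl_cons, pvBStep_eq, ih]

theorem pvAEmit_eq (c : Char) (p : Int) (fn : List String) :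
    pvAEmit (PySem.Chars.lowerChar c) p fn = pvTokEmit fn (c, p) := by
  simp [pvAEmit, pvTokEmit]

theorem pvDigitNotAlpha (c : Char) (h : PySem.Chars.isdigit c = true) :
    PySem.Chars.isalpha c = false := by
  simp [PySem.Chars.isdigit, Char.le_def, UInt32.le_iff_toNat_le] at h
  simp [PySem.Chars.isalpha, PySem.Chars.isupper, PySem.Chars.islower, Char.le_def,
    UInt32.le_iff_toNat_le]
  omega

theorem pvALoop_eq_tok (cs : List Char) (fn : List String) :
    pvALoop cs fn = (pvTokLoop cs none).flatMap (pvTokEmit fn) := by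
  fun_induction pvALoop cs fn
  all_goals simp_all [pvTokLoop, pvAEmit_eq, pvDigitNotAlpha]
  all_goals split <;> simp_all


theorem pvMain (cs : List Char) (fn : List String) :
    pvALoop cs fn = (pvTokLoop cs none).foldl (pvBStep fn) [] := by
  rw [pvInterp_eq_flatMap, pvALoop_eq_tok]; simp

-- ===== VERDICT (by name: the statement is the Claim_ definition above) =====
theorem parse_ascii_flags_spec : Claim_equal_parse_ascii_flags := by
  intro s fn planes _
  unfold Spec_parse_ascii_flags parse_ascii_flags parse_ascii_flags_alt
  split_ifs with h
  · rcases h with h | h <;> subst h <;>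
      simp [pvTokLoop, show PySem.Chars.isalpha '0' = false from rfl]
  · exact pvMain _ _
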